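-- pv_equiv track=rewrite | github.com/27pnk27/DSA-gfg | Matrix.py | boundary
-- ===== SOURCE A (Python) =====
-- def boundary(a):
--     n=len(a)
--     m=len(a[0])
--     s=''
--     if(m==1):
--         for i in range(n):
--             s+=str(a[i][0])+' '
--     elif(n==1):
--         for i in range(m):
--             s+=str(a[0][i])+' '
--
--     else:
--         for i in range(m):
--             s+=str(a[0][i])+' '
--         for i in range(1,n-1):
--             s+=str(a[i][m-1])+' '
--         for i in range(m-1,-1,-1):
--             s+=str(a[n-1][i])+' '
--         for i in range(n-2,0,-1):
--             s+=str(a[i][0])+' '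
--     return s
-- ===== SOURCE B (Python) =====
-- def boundary(a):
--     n, m = len(a), len(a[0])
--     coords = ([(0, j) for j in range(m)]
--               + [(i, m - 1) for i in range(1, n)]
--               + [(n - 1, j) for j in range(m - 2, -1, -1)]
--               + [(i, 0) for i in range(n - 2, 0, -1)])
--     seen = set()
--     parts = []
--     for ij in coords:
--         if ij not in seen:
--             seen.add(ij)
--             parts.append(str(a[ij[0]][ij[1]]) + ' ')
--     return ''.join(parts)
-- ===== Notes on version B (the rewrite author's own statement) =====
-- stated objective: simpler
-- what changed: Replaces A's three-way shape split (single column / single row / general) by one unconditional clockwise perimeter coordinate walk whose visited set collapses the degenerate shapes, joining the pieces at the end.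
-- outside the precondition, e.g. on boundary([[], [1, 2], [3]]): A returns '2 1 ', B returns '2 3 1 '; on boundary([[], []]): A returns '', B raises IndexError
import Mathlib
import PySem

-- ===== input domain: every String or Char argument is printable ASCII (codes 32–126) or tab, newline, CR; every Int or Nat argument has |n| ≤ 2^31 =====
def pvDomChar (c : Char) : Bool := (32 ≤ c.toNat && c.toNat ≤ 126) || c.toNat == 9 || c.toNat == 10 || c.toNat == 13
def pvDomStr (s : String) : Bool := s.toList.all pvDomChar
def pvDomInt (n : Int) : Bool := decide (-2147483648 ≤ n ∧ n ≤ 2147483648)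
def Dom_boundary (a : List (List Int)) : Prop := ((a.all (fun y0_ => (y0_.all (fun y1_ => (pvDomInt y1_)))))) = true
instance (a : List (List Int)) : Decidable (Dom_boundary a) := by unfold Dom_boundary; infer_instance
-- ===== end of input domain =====

-- B replaces A's three-way shape split by one generic clockwise perimeter coordinate walk
-- deduplicated by a visited set (objective: simpler — no special cases for 1-row/1-column shapes).

-- ===== PORT A =====
def boundary (a : List (List Int)) : String :=
  let n : Int := a.length
  let m : Int := (PySem.List.pyGetD a 0 ([] : List Int)).length
  if m = 1 then
    (PySem.List.pyRange 0 n 1).foldl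
      (fun s i => s ++ (PySem.Int.toStr (PySem.List.pyGetD (PySem.List.pyGetD a i []) 0 0) ++ " ")) ""
  else if n = 1 then
    (PySem.List.pyRange 0 m 1).foldl
      (fun s i => s ++ (PySem.Int.toStr (PySem.List.pyGetD (PySem.List.pyGetD a 0 []) i 0) ++ " ")) ""
  else
    let s1 := (PySem.List.pyRange 0 m 1).foldl
      (fun s i => s ++ (PySem.Int.toStr (PySem.List.pyGetD (PySem.List.pyGetD a 0 []) i 0) ++ " ")) ""
    let s2 := (PySem.List.pyRange 1 (n - 1) 1).foldl
      (fun s i => s ++ (PySem.Int.toStr (PySem.List.pyGetD (PySem.List.pyGetD a i []) (m - 1) 0) ++ " ")) s1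
    let s3 := (PySem.List.pyRange (m - 1) (-1) (-1)).foldl
      (fun s i => s ++ (PySem.Int.toStr (PySem.List.pyGetD (PySem.List.pyGetD a (n - 1) []) i 0) ++ " ")) s2
    (PySem.List.pyRange (n - 2) 0 (-1)).foldl
      (fun s i => s ++ (PySem.Int.toStr (PySem.List.pyGetD (PySem.List.pyGetD a i []) 0 0) ++ " ")) s3

-- ===== PORT B =====
def boundary_alt (a : List (List Int)) : String :=
  let n : Int := a.length
  let m : Int := (PySem.List.pyGetD a 0 ([] : List Int)).length
  let coords : List (Int × Int) :=
    (PySem.List.pyRange 0 m 1).map (fun j => ((0 : Int), j))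
    ++ (PySem.List.pyRange 1 n 1).map (fun i => (i, m - 1))
    ++ (PySem.List.pyRange (m - 2) (-1) (-1)).map (fun j => (n - 1, j))
    ++ (PySem.List.pyRange (n - 2) 0 (-1)).map (fun i => (i, (0 : Int)))
  let res := coords.foldl
    (fun (st : PySem.Set (Int × Int) × List String) ij =>
      if st.1.contains ij then st
      else (st.1.add ij,
            st.2 ++ [PySem.Int.toStr (PySem.List.pyGetD (PySem.List.pyGetD a ij.1 []) ij.2 0) ++ " "]))
    (PySem.Set.empty, [])
  PySem.Str.join "" res.2

-- ===== PRECONDITION & SPEC =====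
-- Pre_ excludes the empty matrix and matrices whose first row is empty (there A raises an
-- IndexError or assembles a value through Python's negative-index wraparound a[i][-1], an
-- accident of shape; B's perimeter walk raises or reads other cells there), and ragged
-- matrices with a later row shorter than the first (there A raises IndexError).
def Pre_boundary (a : List (List Int)) : Prop :=
  a ≠ [] ∧ a.headI ≠ [] ∧ ∀ row ∈ a.tail, a.headI.length ≤ row.length
instance (a : List (List Int)) : Decidable (Pre_boundary a) := by unfold Pre_boundary; infer_instance

def pvWitness_boundary : List (List Int) := [[1, 2, 3], [4, 5, 6], [7, 8, 9]]

def Spec_boundary (a : List (List Int)) (out : String) : Prop := out = boundary_alt a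
instance (a : List (List Int)) (out : String) : Decidable (Spec_boundary a out) := by unfold Spec_boundary; infer_instance

-- ===== CLAIM (what is proved, stated in full; the proofs are below) =====
def Claim_equal_boundary : Prop := ∀ (a : List (List Int)), Dom_boundary a → Pre_boundary a → Spec_boundary a (boundary a)

-- ===== LEMMAS AND PROOFS =====

-- the string a cell (i, j) contributes
def gcell (a : List (List Int)) (p : Int × Int) : String :=
  PySem.Int.toStr (PySem.List.pyGetD (PySem.List.pyGetD a p.1 []) p.2 0) ++ " "

theorem join_empty_nil : PySem.Str.join "" ([] : List String) = "" := by
  apply String.toList_inj.mp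
  simp [PySem.Str.toList_join, PySem.Chars.join_nil]

theorem join_empty_cons (x : String) (l : List String) :
    PySem.Str.join "" (x :: l) = x ++ PySem.Str.join "" l := by
  apply String.toList_inj.mp
  cases l with
  | nil => simp [PySem.Str.toList_join, PySem.Chars.join_singleton, PySem.Chars.join_nil]
  | cons y r => simp [PySem.Str.toList_join, PySem.Chars.join_cons_cons]

theorem join_empty_append (l₁ l₂ : List String) :
    PySem.Str.join "" (l₁ ++ l₂) = PySem.Str.join "" l₁ ++ PySem.Str.join "" l₂ := by
  induction l₁ with
  | nil => simp [join_empty_nil]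
  | cons x r ih => simp [join_empty_cons, ih, String.append_assoc]

theorem foldl_append_join {α : Type} (f : α → String) (l : List α) :
    ∀ (s : String), l.foldl (fun acc x => acc ++ f x) s = s ++ PySem.Str.join "" (l.map f) := by
  induction l with
  | nil => intro s; simp [join_empty_nil]
  | cons x r ih => intro s; simp [List.foldl_cons, ih, join_empty_cons, String.append_assoc]

theorem foldB (g : Int × Int → String) (l : List (Int × Int)) :
    ∀ (seen : PySem.Set (Int × Int)) (out : List String),
      (l.foldl (fun st ij => if st.1.contains ij then st else (st.1.add ij, st.2 ++ [g ij]))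
        (seen, out)).2
      = out ++ (((PySem.Set.update seen l).drop seen.length).map g) := by
  induction l with
  | nil => intro seen out; simp [PySem.Set.update]
  | cons x r ih =>
    intro seen out
    by_cases hx : x ∈ seen
    · have h : seen.contains x = true := by simpa [PySem.Set.contains] using hx
      simpa [h, PySem.Set.update_cons, PySem.Set.add, hx] using ih seen out
    · have h : ¬ seen.contains x = true := by simpa [PySem.Set.contains] using hx
      have hadd : PySem.Set.add seen x = seen ++ [x] := by simp [PySem.Set.add, hx]
      simp only [List.foldl_cons, h, if_neg, Bool.not_eq_true, hadd]
      rw [ih (seen ++ [x]) (out ++ [g x])]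
      rw [PySem.Set.update_cons, hadd, PySem.Set.update_eq_append_filter (seen ++ [x]) r]
      simp [List.drop_append, List.append_assoc]

theorem injPair_left (c : Int) : Function.Injective (fun i : Int => (i, c)) := by
  intro x y h; simpa using h

theorem injPair_right (c : Int) : Function.Injective (fun j : Int => (c, j)) := by
  intro x y h; simpa using h


theorem coords_m1 (n : Int) (hn : 1 ≤ n) :
    PySem.Set.ofList ((PySem.List.pyRange 0 1 1).map (fun j => ((0 : Int), j))
      ++ (PySem.List.pyRange 1 n 1).map (fun i => (i, (0 : Int)))
      ++ (PySem.List.pyRange (-1) (-1) (-1)).map (fun j => (n - 1, j))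
      ++ (PySem.List.pyRange (n - 2) 0 (-1)).map (fun i => (i, (0 : Int))))
    = (PySem.List.pyRange 0 n 1).map (fun i => (i, (0 : Int))) := by
  have h1 : PySem.List.pyRange 0 1 1 = [0] := by decide
  have h2 : PySem.List.pyRange (-1) (-1) (-1) = ([] : List Int) := by decide
  have h3 : PySem.List.pyRange 0 n 1 = 0 :: PySem.List.pyRange 1 n 1 :=
    PySem.List.pyRange_one_cons (by omega)
  have hnodup : ((PySem.List.pyRange 0 n 1).map (fun i => (i, (0 : Int)))).Nodup :=
    (PySem.List.nodup_pyRange_one 0 n).map (injPair_left 0)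
  have harg : ((PySem.List.pyRange 0 1 1).map (fun j => ((0 : Int), j))
      ++ (PySem.List.pyRange 1 n 1).map (fun i => (i, (0 : Int)))
      ++ (PySem.List.pyRange (-1) (-1) (-1)).map (fun j => (n - 1, j))
      ++ (PySem.List.pyRange (n - 2) 0 (-1)).map (fun i => (i, (0 : Int))))
      = (PySem.List.pyRange 0 n 1).map (fun i => (i, (0 : Int)))
        ++ (PySem.List.pyRange (n - 2) 0 (-1)).map (fun i => (i, (0 : Int))) := by
    rw [h1, h2, h3]; simp
  rw [harg, PySem.Set.ofList_append, PySem.Set.ofList_eq_self_of_nodup _ hnodup,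
      PySem.Set.update_eq_append_filter]
  have hfil : ((PySem.Set.ofList ((PySem.List.pyRange (n - 2) 0 (-1)).map (fun i => (i, (0 : Int))))).filter
      (fun y => !PySem.Set.contains ((PySem.List.pyRange 0 n 1).map (fun i => (i, (0 : Int)))) y)) = [] := by
    rw [List.filter_eq_nil_iff]
    intro y hy
    obtain ⟨i, hi, rfl⟩ := List.mem_map.mp ((PySem.Set.mem_ofList _ _).mp hy)
    have hib := PySem.List.mem_pyRange_neg_one.mp hi
    simp only [PySem.Set.contains, Bool.not_eq_true', Bool.not_eq_false, List.contains_iff_mem]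
    exact List.mem_map.mpr ⟨i, PySem.List.mem_pyRange_one.mpr (by omega), rfl⟩
  rw [hfil, List.append_nil]


theorem coords_n1 (m : Int) :
    PySem.Set.ofList ((PySem.List.pyRange 0 m 1).map (fun j => ((0 : Int), j))
      ++ (PySem.List.pyRange 1 1 1).map (fun i => (i, m - 1))
      ++ (PySem.List.pyRange (m - 2) (-1) (-1)).map (fun j => ((0 : Int), j))
      ++ (PySem.List.pyRange (-1) 0 (-1)).map (fun i => (i, (0 : Int))))
    = (PySem.List.pyRange 0 m 1).map (fun j => ((0 : Int), j)) := by
  have h1 : PySem.List.pyRange 1 1 1 = ([] : List Int) := PySem.List.pyRange_one_eq_nil le_rfl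
  have h2 : PySem.List.pyRange (-1) 0 (-1) = ([] : List Int) :=
    PySem.List.pyRange_neg_one_eq_nil (by norm_num)
  have hnodup : ((PySem.List.pyRange 0 m 1).map (fun j => ((0 : Int), j))).Nodup :=
    (PySem.List.nodup_pyRange_one 0 m).map (injPair_right 0)
  have harg : ((PySem.List.pyRange 0 m 1).map (fun j => ((0 : Int), j))
      ++ (PySem.List.pyRange 1 1 1).map (fun i => (i, m - 1))
      ++ (PySem.List.pyRange (m - 2) (-1) (-1)).map (fun j => ((0 : Int), j))
      ++ (PySem.List.pyRange (-1) 0 (-1)).map (fun i => (i, (0 : Int))))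
      = (PySem.List.pyRange 0 m 1).map (fun j => ((0 : Int), j))
        ++ (PySem.List.pyRange (m - 2) (-1) (-1)).map (fun j => ((0 : Int), j)) := by
    rw [h1, h2]; simp
  rw [harg, PySem.Set.ofList_append, PySem.Set.ofList_eq_self_of_nodup _ hnodup,
      PySem.Set.update_eq_append_filter]
  have hfil : ((PySem.Set.ofList ((PySem.List.pyRange (m - 2) (-1) (-1)).map (fun j => ((0 : Int), j)))).filter
      (fun y => !PySem.Set.contains ((PySem.List.pyRange 0 m 1).map (fun j => ((0 : Int), j))) y)) = [] := by
    rw [List.filter_eq_nil_iff]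
    intro y hy
    obtain ⟨j, hj, rfl⟩ := List.mem_map.mp ((PySem.Set.mem_ofList _ _).mp hy)
    have hjb := PySem.List.mem_pyRange_neg_one.mp hj
    simp only [PySem.Set.contains, Bool.not_eq_true', Bool.not_eq_false, List.contains_iff_mem]
    exact List.mem_map.mpr ⟨j, PySem.List.mem_pyRange_one.mpr (by omega), rfl⟩
  rw [hfil, List.append_nil]

theorem nodup_pyRange_neg_one (a b : Int) : (PySem.List.pyRange a b (-1)).Nodup := by
  rw [PySem.List.pyRange_neg_one_eq_reverse]
  exact List.nodup_reverse.mpr (PySem.List.nodup_pyRange_one _ _)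

theorem coords_gen (n m : Int) (hn : 2 ≤ n) (hm : 2 ≤ m) :
    PySem.Set.ofList ((PySem.List.pyRange 0 m 1).map (fun j => ((0 : Int), j))
      ++ (PySem.List.pyRange 1 n 1).map (fun i => (i, m - 1))
      ++ (PySem.List.pyRange (m - 2) (-1) (-1)).map (fun j => (n - 1, j))
      ++ (PySem.List.pyRange (n - 2) 0 (-1)).map (fun i => (i, (0 : Int))))
    = (PySem.List.pyRange 0 m 1).map (fun j => ((0 : Int), j))
      ++ (PySem.List.pyRange 1 (n - 1) 1).map (fun i => (i, m - 1))
      ++ ((n - 1, m - 1) :: (PySem.List.pyRange (m - 2) (-1) (-1)).map (fun j => (n - 1, j)))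
      ++ (PySem.List.pyRange (n - 2) 0 (-1)).map (fun i => (i, (0 : Int))) := by
  have hnd : ((PySem.List.pyRange 0 m 1).map (fun j => ((0 : Int), j))
      ++ (PySem.List.pyRange 1 n 1).map (fun i => (i, m - 1))
      ++ (PySem.List.pyRange (m - 2) (-1) (-1)).map (fun j => (n - 1, j))
      ++ (PySem.List.pyRange (n - 2) 0 (-1)).map (fun i => (i, (0 : Int)))).Nodup := by
    rw [List.append_assoc, List.append_assoc]
    refine List.Nodup.append ((PySem.List.nodup_pyRange_one 0 m).map (injPair_right 0)) ?_ ?_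
    · refine List.Nodup.append ((PySem.List.nodup_pyRange_one 1 n).map (injPair_left (m - 1))) ?_ ?_
      · refine List.Nodup.append ((nodup_pyRange_neg_one (m - 2) (-1)).map (injPair_right (n - 1)))
          ((nodup_pyRange_neg_one (n - 2) 0).map (injPair_left 0)) ?_
        · intro x hx hx'
          obtain ⟨j, hj, rfl⟩ := List.mem_map.mp hx
          obtain ⟨i, hi, hix⟩ := List.mem_map.mp hx'
          have h1 := PySem.List.mem_pyRange_neg_one.mp hj
          have h2 := PySem.List.mem_pyRange_neg_one.mp hi
          rw [Prod.mk.injEq] at hix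
          omega
      · intro x hx hx'
        obtain ⟨i, hi, rfl⟩ := List.mem_map.mp hx
        have h1 := PySem.List.mem_pyRange_one.mp hi
        rcases List.mem_append.mp hx' with h | h
        · obtain ⟨j, hj, hjx⟩ := List.mem_map.mp h
          have h2 := PySem.List.mem_pyRange_neg_one.mp hj
          rw [Prod.mk.injEq] at hjx
          omega
        · obtain ⟨i', hi', hix⟩ := List.mem_map.mp h
          have h2 := PySem.List.mem_pyRange_neg_one.mp hi'
          rw [Prod.mk.injEq] at hix
          omega
    · intro x hx hx'
      obtain ⟨j, hj, rfl⟩ := List.mem_map.mp hx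
      have h0 := PySem.List.mem_pyRange_one.mp hj
      rcases List.mem_append.mp hx' with h | h
      · obtain ⟨i, hi, hix⟩ := List.mem_map.mp h
        have h2 := PySem.List.mem_pyRange_one.mp hi
        rw [Prod.mk.injEq] at hix
        omega
      · rcases List.mem_append.mp h with h' | h'
        · obtain ⟨j', hj', hjx⟩ := List.mem_map.mp h'
          have h2 := PySem.List.mem_pyRange_neg_one.mp hj'
          rw [Prod.mk.injEq] at hjx
          omega
        · obtain ⟨i, hi, hix⟩ := List.mem_map.mp h'
          have h2 := PySem.List.mem_pyRange_neg_one.mp hi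
          rw [Prod.mk.injEq] at hix
          omega
  rw [PySem.Set.ofList_eq_self_of_nodup _ hnd]
  have hsplit : PySem.List.pyRange 1 n 1 = PySem.List.pyRange 1 (n - 1) 1 ++ [n - 1] := by
    have h := PySem.List.pyRange_one_succ_right (a := 1) (b := n - 1) (by omega)
    simpa using h
  rw [hsplit]
  simp [List.append_assoc]



-- the perimeter coordinate list B builds (proof-side name for the term inside boundary_alt)
def coordsOf (a : List (List Int)) : List (Int × Int) :=
  (PySem.List.pyRange 0 ((PySem.List.pyGetD a 0 ([] : List Int)).length : Int) 1).map
      (fun j => ((0 : Int), j))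
  ++ (PySem.List.pyRange 1 (a.length : Int) 1).map
      (fun i => (i, ((PySem.List.pyGetD a 0 ([] : List Int)).length : Int) - 1))
  ++ (PySem.List.pyRange (((PySem.List.pyGetD a 0 ([] : List Int)).length : Int) - 2) (-1) (-1)).map
      (fun j => ((a.length : Int) - 1, j))
  ++ (PySem.List.pyRange ((a.length : Int) - 2) 0 (-1)).map (fun i => (i, (0 : Int)))

theorem altB (a : List (List Int)) :
    boundary_alt a = PySem.Str.join "" ((PySem.Set.ofList (coordsOf a)).map (gcell a)) := by
  show PySem.Str.join "" ((coordsOf a).foldl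
      (fun st ij => if st.1.contains ij then st else (st.1.add ij, st.2 ++ [gcell a ij]))
      (PySem.Set.empty, [])).2 = _
  rw [foldB (gcell a) (coordsOf a) PySem.Set.empty []]
  simp [PySem.Set.empty, PySem.Set.update_nil_left]

-- ===== VERDICT (by name: the statement is the Claim_ definition above) =====
theorem boundary_spec : Claim_equal_boundary := by
  intro a _ hpre
  obtain ⟨hane, h0ne, hrows⟩ := hpre
  unfold Spec_boundary
  rw [altB]
  have hrow0 : PySem.List.pyGetD a 0 ([] : List Int) = a.headI := by
    cases a with
    | nil => exact absurd rfl hane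
    | cons r t => simp [PySem.List.pyGetD_zero_cons, List.headI]
  have hM : (1 : Int) ≤ ((PySem.List.pyGetD a 0 ([] : List Int)).length : Int) := by
    rw [hrow0]
    have : a.headI.length ≠ 0 := by simpa [List.length_eq_zero_iff] using h0ne
    omega
  have hN : (1 : Int) ≤ (a.length : Int) := by
    have : a.length ≠ 0 := by simpa [List.length_eq_zero_iff] using hane
    omega
  by_cases hm1 : ((PySem.List.pyGetD a 0 ([] : List Int)).length : Int) = 1
  · -- single-column branch
    show (if ((PySem.List.pyGetD a 0 ([] : List Int)).length : Int) = 1 then _ else _) = _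
    rw [if_pos hm1]
    rw [foldl_append_join, String.empty_append]
    unfold coordsOf
    rw [hm1, show (1 : Int) - 1 = 0 by norm_num, show (1 : Int) - 2 = -1 by norm_num]
    rw [coords_m1 (a.length : Int) hN]
    simp [List.map_map, Function.comp_def, gcell]
  · by_cases hn1 : (a.length : Int) = 1
    · -- single-row branch
      show (if ((PySem.List.pyGetD a 0 ([] : List Int)).length : Int) = 1 then _ else _) = _
      rw [if_neg hm1, if_pos hn1]
      rw [foldl_append_join, String.empty_append]
      unfold coordsOf
      rw [hn1, show (1 : Int) - 1 = 0 by norm_num, show (1 : Int) - 2 = -1 by norm_num]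
      rw [coords_n1 ((PySem.List.pyGetD a 0 ([] : List Int)).length : Int)]
      simp [List.map_map, Function.comp_def, gcell]
    · -- general branch
      show (if ((PySem.List.pyGetD a 0 ([] : List Int)).length : Int) = 1 then _ else _) = _
      rw [if_neg hm1, if_neg hn1]
      unfold coordsOf
      rw [coords_gen (a.length : Int) ((PySem.List.pyGetD a 0 ([] : List Int)).length : Int)
        (by omega) (by omega)]
      rw [foldl_append_join, foldl_append_join, foldl_append_join, foldl_append_join,
        String.empty_append]
      have hbot : PySem.List.pyRange (((PySem.List.pyGetD a 0 ([] : List Int)).length : Int) - 1) (-1) (-1)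
          = (((PySem.List.pyGetD a 0 ([] : List Int)).length : Int) - 1)
            :: PySem.List.pyRange (((PySem.List.pyGetD a 0 ([] : List Int)).length : Int) - 2) (-1) (-1) := by
        have h := PySem.List.pyRange_neg_one_cons
          (a := ((PySem.List.pyGetD a 0 ([] : List Int)).length : Int) - 1) (b := -1) (by omega)
        rw [show ((PySem.List.pyGetD a 0 ([] : List Int)).length : Int) - 1 - 1 = ((PySem.List.pyGetD a 0 ([] : List Int)).length : Int) - 2 by ring] at h
        exact h
      rw [hbot]
      simp [join_empty_append, join_empty_cons, List.map_map, Function.comp_def, gcell,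
        String.append_assoc]
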